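-- pv_equiv track=rewrite | github.com/bitnara-opasnet/github-office | eni_test/lib/random_topology.py | get_random_link
-- ===== SOURCE A (Python) =====
-- def increase_num(num):
--     n=num
--     while True:
--         n+=1
--         yield n
--
-- def get_random_link(new_node_data, div_num):
--     new_node_list = new_node_data
--     link_n1 = increase_num(100000)
--     link_n2 = increase_num(200000)
--     random_link = []
--     for i in range(len(new_node_data)):
--         if i < div_num:
--             random_link.append([new_node_list[i].get('id'), str(next(link_n1))])
--         else:
--             random_link.append([new_node_list[i].get('id'), str(next(link_n2))])
--     return random_link
-- ===== SOURCE B (Python) =====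
-- def get_random_link(new_node_data, div_num):
--     base = max(div_num, 0)
--     return [[node.get('id'),
--              str(100001 + i) if i < div_num else str(200001 + i - base)]
--             for i, node in enumerate(new_node_data)]
-- ===== Notes on version B (the rewrite author's own statement) =====
-- stated objective: simpler
-- what changed: The two stateful increase_num generators are removed; each counter is computed in closed form from the enumerate index (100001+i, or 200001+i-max(div_num,0)), turning the stateful loop into a single list comprehension.
import Mathlib
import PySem

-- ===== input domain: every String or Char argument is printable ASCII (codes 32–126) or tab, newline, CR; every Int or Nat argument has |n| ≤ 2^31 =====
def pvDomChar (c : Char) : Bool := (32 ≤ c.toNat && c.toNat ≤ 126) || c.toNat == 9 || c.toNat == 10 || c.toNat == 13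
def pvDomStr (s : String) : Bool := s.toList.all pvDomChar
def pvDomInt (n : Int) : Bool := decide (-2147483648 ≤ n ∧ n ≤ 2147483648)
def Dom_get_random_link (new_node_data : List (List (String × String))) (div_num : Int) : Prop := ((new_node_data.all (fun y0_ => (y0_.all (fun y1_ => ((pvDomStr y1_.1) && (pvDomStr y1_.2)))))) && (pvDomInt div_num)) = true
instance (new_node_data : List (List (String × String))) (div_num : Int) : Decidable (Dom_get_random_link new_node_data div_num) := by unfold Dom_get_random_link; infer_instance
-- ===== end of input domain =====

-- B replaces A's two stateful increase_num generators by a closed-form counter computed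
-- from the enumerate index (objective: simpler).

-- ===== PORT A =====
-- The generators increase_num(100000)/increase_num(200000) are ported as the integer state
-- of each generator carried through the fold; next(g) advances the state by 1 and yields it
-- (exact for this always-incrementing generator).
def get_random_link (new_node_data : List (List (String × String))) (div_num : Int) : List (List (Option String)) :=
  let new_node_list := new_node_data
  let st := (PySem.List.pyRange 0 new_node_data.length 1).foldl
    (fun (st : List (List (Option String)) × Int × Int) i =>
      if i < div_num then
        (st.1 ++ [[PySem.Dict.get? (PySem.Dict.mk (PySem.List.pyGetD new_node_list i [])) "id",
                   some (PySem.Int.toStr (st.2.1 + 1))]], st.2.1 + 1, st.2.2)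
      else
        (st.1 ++ [[PySem.Dict.get? (PySem.Dict.mk (PySem.List.pyGetD new_node_list i [])) "id",
                   some (PySem.Int.toStr (st.2.2 + 1))]], st.2.1, st.2.2 + 1))
    ([], 100000, 200000)
  st.1

-- ===== PORT B =====
def get_random_link_alt (new_node_data : List (List (String × String))) (div_num : Int) : List (List (Option String)) :=
  let base := max div_num 0
  (PySem.List.enumerate new_node_data).map (fun p =>
    [PySem.Dict.get? (PySem.Dict.mk p.2) "id",
     some (if p.1 < div_num then PySem.Int.toStr (100001 + p.1)
           else PySem.Int.toStr (200001 + p.1 - base))])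

-- ===== PRECONDITION & SPEC =====
def Spec_get_random_link (new_node_data : List (List (String × String))) (div_num : Int) (out : List (List (Option String))) : Prop := out = get_random_link_alt new_node_data div_num
instance (new_node_data : List (List (String × String))) (div_num : Int) (out : List (List (Option String))) : Decidable (Spec_get_random_link new_node_data div_num out) := by unfold Spec_get_random_link; infer_instance

-- ===== CLAIM (what is proved, stated in full; the proofs are below) =====
def Claim_equal_get_random_link : Prop := ∀ (new_node_data : List (List (String × String))) (div_num : Int), Dom_get_random_link new_node_data div_num → Spec_get_random_link new_node_data div_num (get_random_link new_node_data div_num)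

-- ===== LEMMAS AND PROOFS =====

-- A's loop body, rephrased on (index, row) pairs (definitionally A's body after
-- enumerate_eq_map_pyRange + foldl_map).
def glStep (div_num : Int) (st : List (List (Option String)) × Int × Int)
    (p : Int × List (String × String)) : List (List (Option String)) × Int × Int :=
  if p.1 < div_num then
    (st.1 ++ [[PySem.Dict.get? (PySem.Dict.mk p.2) "id",
               some (PySem.Int.toStr (st.2.1 + 1))]], st.2.1 + 1, st.2.2)
  else
    (st.1 ++ [[PySem.Dict.get? (PySem.Dict.mk p.2) "id",
               some (PySem.Int.toStr (st.2.2 + 1))]], st.2.1, st.2.2 + 1)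

-- Invariant: with counters c1/c2 equal to the generator states determined by the start
-- index s, the fold produces exactly B's closed-form rows, appended to the accumulator.
lemma gl_aux (div_num : Int) (xs : List (List (String × String))) :
    ∀ (s : Int), 0 ≤ s → ∀ (acc : List (List (Option String))) (c1 c2 : Int),
    c1 = 100000 + min s (max div_num 0) →
    c2 = 200000 + (s - min s (max div_num 0)) →
    ((PySem.List.enumerate xs s).foldl (glStep div_num) (acc, c1, c2)).1
      = acc ++ (PySem.List.enumerate xs s).map (fun p =>
          [PySem.Dict.get? (PySem.Dict.mk p.2) "id",
           some (if p.1 < div_num then PySem.Int.toStr (100001 + p.1)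
                 else PySem.Int.toStr (200001 + p.1 - max div_num 0))]) := by
  induction xs with
  | nil => intro s hs acc c1 c2 h1 h2; simp [PySem.List.enumerate_nil]
  | cons x xs ih =>
    intro s hs acc c1 c2 h1 h2
    rw [PySem.List.enumerate_cons]
    simp only [List.foldl_cons, List.map_cons]
    by_cases h : s < div_num
    · have e1 : c1 + 1 = 100001 + s := by omega
      simp only [glStep, if_pos h, e1]
      rw [ih (s + 1) (by omega) _ _ _ (by omega) (by omega)]
      simp
    · have e2 : c2 + 1 = 200001 + s - max div_num 0 := by omega
      simp only [glStep, if_neg h, e2]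
      rw [ih (s + 1) (by omega) _ _ _ (by omega) (by omega)]
      simp

-- ===== VERDICT (by name: the statement is the Claim_ definition above) =====
theorem get_random_link_spec : Claim_equal_get_random_link := by
  intro nd div_num _
  unfold Spec_get_random_link get_random_link get_random_link_alt
  have hrw : (PySem.List.pyRange 0 nd.length 1).foldl
      (fun (st : List (List (Option String)) × Int × Int) i =>
        if i < div_num then
          (st.1 ++ [[PySem.Dict.get? (PySem.Dict.mk (PySem.List.pyGetD nd i [])) "id",
                     some (PySem.Int.toStr (st.2.1 + 1))]], st.2.1 + 1, st.2.2)
        else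
          (st.1 ++ [[PySem.Dict.get? (PySem.Dict.mk (PySem.List.pyGetD nd i [])) "id",
                     some (PySem.Int.toStr (st.2.2 + 1))]], st.2.1, st.2.2 + 1))
      ([], 100000, 200000)
      = (PySem.List.enumerate nd).foldl (glStep div_num) ([], 100000, 200000) := by
    rw [PySem.List.enumerate_eq_map_pyRange (xs := nd) (d := ([] : List (String × String))), List.foldl_map]
    rfl
  simp only []
  rw [hrw, gl_aux div_num nd 0 (by omega) [] 100000 200000 (by omega) (by omega)]
  simp
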